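-- pv_equiv track=rewrite | github.com/Jromary/Python_Exemple | Max.py | hop
-- ===== SOURCE A (Python) =====
-- def hop(t):
-- 	nbc=0
-- 	T=[]
-- 	if len(t)==1:
-- 		return t
-- 	for i in t:
-- 		T+=[[i]]
-- 	while len(T)>1:
-- 		n=0
-- 		while 2*n+1 < len(T):
-- 			if T[2*n][0] < T[2*n+1][0]:
-- 				T[2*n],T[2*n+1] = T[2*n+1],T[2*n]
-- 			nbc+=1
-- 			T[2*n]+=[T[2*n+1][0]]
-- 			n+=1
-- 		T=T[0::2]
-- 	nbc+=len(T[0])-2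
-- 	return(T[0][0],max(T[0][1::]),nbc)
-- ===== SOURCE B (Python) =====
-- def hop(t):
--     if len(t) == 1:
--         return t
--     s = sorted(t, reverse=True)
--     i = t.index(s[0])          # leftmost max: the tournament winner under strict '<'
--     L = len(t)
--     games = 0                  # games played by the winner
--     while L > 1:
--         if not (L % 2 == 1 and i == L - 1):   # the last bracket slot of an odd round is a bye
--             games += 1
--         i //= 2
--         L = (L + 1) // 2
--     return (s[0], s[1], (len(t) - 1) + games - 1)
-- ===== Notes on version B (the rewrite author's own statement) =====
-- stated objective: faster
-- what changed: A simulates the whole tournament, building a list of bracket lists and repeatedly merging pairs; B sorts once to read off max and second-max and computes the comparison count arithmetically by following only the winner's index through the rounds (games = n-1 plus winner's games minus 1, skipping bye slots).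
-- outside the precondition, e.g. on hop([3]): A returns (3,), B returns (3,)
import Mathlib
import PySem

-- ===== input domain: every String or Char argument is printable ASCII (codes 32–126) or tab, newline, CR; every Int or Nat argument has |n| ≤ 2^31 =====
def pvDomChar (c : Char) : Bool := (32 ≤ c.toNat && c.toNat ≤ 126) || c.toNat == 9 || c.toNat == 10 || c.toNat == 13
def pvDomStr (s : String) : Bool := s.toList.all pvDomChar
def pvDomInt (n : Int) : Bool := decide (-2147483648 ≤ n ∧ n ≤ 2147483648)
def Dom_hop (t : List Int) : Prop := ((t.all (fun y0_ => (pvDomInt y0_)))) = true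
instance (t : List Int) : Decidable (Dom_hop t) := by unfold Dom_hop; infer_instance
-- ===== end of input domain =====

-- B replaces A's explicit tournament simulation (building and merging bracket lists) by
-- sorting once for the two extremes and an arithmetic bye-counting loop for the comparison
-- count; equivalence is proved for lists of length ≥ 2 (Pre_hop: on shorter input A raises
-- or returns a list instead of an int-triple).

-- ===== PORT A =====
-- One pass of A's inner 'while 2*n+1 < len(T)' followed by 'T = T[0::2]': the loop visits the
-- pairs (T[2n], T[2n+1]) left to right — compare heads, swap so the winner sits at the even
-- slot, count the comparison, append the loser's head to the winner — and the slice keeps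
-- exactly the winners (plus a trailing bye block).  `headD 0` is list[0]; every block on the
-- reachable states is nonempty, so the index is always in range.
def roundA : List (List Int) → Int → List (List Int) × Int
  | a :: b :: rest, nbc =>
      let w := if a.headD 0 < b.headD 0 then (b, a) else (a, b)
      let r := roundA rest (nbc + 1)
      ((w.1 ++ [w.2.headD 0]) :: r.1, r.2)
  | T, nbc => (T, nbc)

-- A's outer 'while len(T) > 1' loop, with a fuel guard (fuel = initial number of blocks,
-- which bounds the number of rounds since each round at least halves len(T)).
def loopAux : Nat → List (List Int) → Int → List (List Int) × Int
  | 0, T, c => (T, c)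
  | f + 1, T, c =>
      if 1 < T.length then loopAux f (roundA T c).1 (roundA T c).2 else (T, c)

def hop (t : List Int) : Int × Int × Int :=
  if t.length == 1 then
    -- Python returns the LIST t here (not an int-triple): outside Pre_hop
    (t.headD 0, t.headD 0, 0)
  else
    let T0 := t.foldl (fun acc i => acc ++ [[i]]) []   -- for i in t: T += [[i]]
    let r := loopAux T0.length T0 0
    let l := r.1.headD []        -- T[0]; IndexError on empty t — outside Pre_hop
    -- T[0][1::] is drop 1; max(...) raises ValueError only on an empty list, which is
    -- unreachable for len(t) ≥ 2 (inside Pre_hop the winner has played ≥ 1 game)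
    (l.headD 0, (PySem.List.max? (l.drop 1) (fun x => x)).getD 0, r.2 + (l.length : Int) - 2)

-- ===== PORT B =====
-- Source B's 'while L > 1' loop counting the winner's games, with the same kind of fuel guard
-- (fuel = initial L; L at least halves each iteration).
def bgamesAux : Nat → Nat → Nat → Int → Int
  | 0, _, _, g => g
  | f + 1, i, L, g =>
      if 1 < L then
        bgamesAux f (i / 2) ((L + 1) / 2) (if L % 2 = 1 ∧ i = L - 1 then g else g + 1)
      else g

def bgames (i L : Nat) (g : Int) : Int := bgamesAux L i L g

def hop_alt (t : List Int) : Int × Int × Int :=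
  if t.length == 1 then
    -- Python returns the LIST t here (not an int-triple): outside Pre_hop
    (t.headD 0, t.headD 0, 0)
  else
    let s := PySem.List.sorted t (fun x => x) true   -- sorted(t, reverse=True)
    let m := s.headD 0                               -- s[0]; IndexError on empty t — outside Pre_hop
    let i := (PySem.List.index? t m).getD 0          -- t.index(s[0]); always found (m ∈ t)
    let g := bgames i t.length 0
    (m, (s.drop 1).headD 0, ((t.length : Int) - 1) + g - 1)   -- s[1] = (drop 1).headD, in range for len ≥ 2

-- ===== PRECONDITION & SPEC =====
-- Pre_hop excludes len(t) = 0, where A raises IndexError, and len(t) = 1, where A returns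
-- the list t itself rather than a value of the declared int-triple type.
def Pre_hop (t : List Int) : Prop := 2 ≤ t.length
instance (t : List Int) : Decidable (Pre_hop t) := by unfold Pre_hop; infer_instance

def pvWitness_hop : List Int := [3, 7, 2, 7, 5]

def Spec_hop (t : List Int) (out : Int × Int × Int) : Prop := out = hop_alt t
instance (t : List Int) (out : Int × Int × Int) : Decidable (Spec_hop t out) := by unfold Spec_hop; infer_instance

-- ===== CLAIM (what is proved, stated in full; the proofs are below) =====
def Claim_equal_hop : Prop := ∀ (t : List Int), Dom_hop t → Pre_hop t → Spec_hop t (hop t)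

-- ===== LEMMAS AND PROOFS =====

-- `blockOK l r` : l is a tournament block (winner first, then the heads it captured) and r is
-- the multiset of the block's other original elements: every element of r is ≤ the winner,
-- and the captured heads l.tail and r dominate each other (so they have the same maximum).
def blockOK (l r : List Int) : Prop :=
  l ≠ [] ∧ (∀ x ∈ r, x ≤ l.headD 0) ∧
    (∀ x ∈ l.tail, ∃ y ∈ r, x ≤ y) ∧ (∀ y ∈ r, ∃ x ∈ l.tail, y ≤ x)

-- the original elements represented by blocks T with ghost rests R
def glue : List (List Int) → List (List Int) → List Int
  | l :: T, r :: R => (l.headD 0 :: r) ++ glue T R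
  | _, _ => []

-- head / length of block j
def hdb (T : List (List Int)) (j : Nat) : Int := (T[j]?.getD []).headD 0
def lnb (T : List (List Int)) (j : Nat) : Nat := (T[j]?.getD []).length

theorem roundA_len : ∀ (T : List (List Int)) (c : Int),
    (roundA T c).1.length = (T.length + 1) / 2
  | [], _ => by simp [roundA]
  | [a], _ => by simp [roundA]
  | a :: b :: rest, c => by
      simp only [roundA, List.length_cons]
      rw [roundA_len rest]
      omega

theorem roundA_nbc : ∀ (T : List (List Int)) (c : Int),
    (roundA T c).2 = c + ((T.length / 2 : Nat) : Int)
  | [], _ => by simp [roundA]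
  | [a], _ => by simp [roundA]
  | a :: b :: rest, c => by
      simp only [roundA, List.length_cons]
      rw [roundA_nbc rest]
      push_cast
      omega

theorem bgamesAux_mono : ∀ (f1 f2 i L : Nat) (g : Int), L ≤ f1 → L ≤ f2 →
    bgamesAux f1 i L g = bgamesAux f2 i L g
  | f1, f2, i, 0, g, _, _ => by cases f1 <;> cases f2 <;> simp [bgamesAux]
  | f1, f2, i, 1, g, _, _ => by cases f1 <;> cases f2 <;> simp [bgamesAux]
  | f1+1, f2+1, i, L+2, g, h1, h2 => by
      simp only [bgamesAux, if_pos (by omega : 1 < L+2)]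
      exact bgamesAux_mono f1 f2 (i/2) ((L+2+1)/2) _ (by omega) (by omega)
  | 0, _, _, L+2, _, h1, _ => absurd h1 (by omega)
  | _+1, 0, _, L+2, _, _, h2 => absurd h2 (by omega)
termination_by _ _ _ L _ => L
decreasing_by omega

theorem bgames_exit (i L : Nat) (g : Int) (h : ¬ 1 < L) : bgames i L g = g := by
  unfold bgames
  match L, h with
  | 0, _ => rfl
  | 1, _ => simp [bgamesAux]
  | L+2, h => exact absurd (by omega) h

theorem bgames_step (i L : Nat) (g : Int) (h : 1 < L) :
    bgames i L g = bgames (i / 2) ((L + 1) / 2) (if L % 2 = 1 ∧ i = L - 1 then g else g + 1) := by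
  unfold bgames
  obtain ⟨f, rfl⟩ : ∃ f, L = f + 1 := ⟨L - 1, by omega⟩
  rw [show bgamesAux (f+1) i (f+1) g = bgamesAux f (i/2) ((f+1+1)/2) (if (f+1) % 2 = 1 ∧ i = (f+1) - 1 then g else g+1) from by
    simp only [bgamesAux, if_pos h]]
  exact bgamesAux_mono _ _ _ _ _ (by omega) (by omega)

theorem bgames_acc : ∀ (L i : Nat) (g : Int), bgames i L g = g + bgames i L 0 := by
  intro L
  induction L using Nat.strong_induction_on with
  | _ L ih =>
    intro i g
    by_cases h : 1 < L
    · rw [bgames_step i L g h, bgames_step i L 0 h,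
        ih ((L+1)/2) (by omega) (i/2), ih ((L+1)/2) (by omega) (i/2) (if L % 2 = 1 ∧ i = L - 1 then (0:Int) else 0+1)]
      split_ifs <;> ring
    · rw [bgames_exit _ _ _ h, bgames_exit _ _ _ h]; ring

theorem bgames_pos : ∀ (L i : Nat), 2 ≤ L → 1 ≤ bgames i L 0 := by
  intro L
  induction L using Nat.strong_induction_on with
  | _ L ih =>
    intro i hL
    rw [bgames_step _ _ _ (by omega), bgames_acc]
    rcases Nat.lt_or_ge L 3 with h3 | h3
    · have hL2 : L = 2 := by omega
      subst hL2
      rw [bgames_exit _ _ _ (by omega)]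
      norm_num
    · have := ih ((L+1)/2) (by omega) (i/2) (by omega)
      split_ifs <;> omega

theorem headD_append (b : List Int) (x d : Int) (h : b ≠ []) :
    (b ++ [x]).headD d = b.headD d := by
  cases b with
  | nil => exact absurd rfl h
  | cons y ys => rfl

theorem tail_append (b : List Int) (x : Int) (h : b ≠ []) :
    (b ++ [x]).tail = b.tail ++ [x] := by
  cases b with
  | nil => exact absurd rfl h
  | cons y ys => rfl

theorem round_blocks : ∀ (T R : List (List Int)) (c : Int),
    List.Forall₂ blockOK T R →
    ∃ R', List.Forall₂ blockOK (roundA T c).1 R' ∧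
      (glue (roundA T c).1 R').Perm (glue T R)
  | [], [], c, _ => ⟨[], by simp [roundA, glue]⟩
  | [a], [ra], c, h => by
      refine ⟨[ra], ?_, ?_⟩
      · simpa [roundA] using h
      · simp [roundA]
  | a :: b :: rest, ra :: rb :: rrest, c, h => by
      obtain ⟨hab, h⟩ := List.forall₂_cons.mp h
      obtain ⟨hbb, h⟩ := List.forall₂_cons.mp h
      obtain ⟨R', hOK, hperm⟩ := round_blocks rest rrest (c+1) h
      obtain ⟨hane, hara, ha3, ha4⟩ := hab
      obtain ⟨hbne, hbrb, hb3, hb4⟩ := hbb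
      by_cases hlt : a.headD 0 < b.headD 0
      · -- b wins: merged block  b ++ [head a], ghost rest  head a :: (ra ++ rb)
        refine ⟨(a.headD 0 :: (ra ++ rb)) :: R', ?_, ?_⟩
        · refine List.forall₂_cons.mpr ⟨?_, by simpa [roundA, hlt] using hOK⟩
          simp only [if_pos hlt]
          refine ⟨by simp, ?_, ?_, ?_⟩
          · intro x hx
            rw [headD_append _ _ _ hbne]
            rcases List.mem_cons.mp hx with rfl | hx
            · exact le_of_lt hlt
            · rcases List.mem_append.mp hx with hx | hx
              · exact le_of_lt (lt_of_le_of_lt (hara x hx) hlt)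
              · exact hbrb x hx
          · intro x hx
            rw [tail_append _ _ hbne] at hx
            rcases List.mem_append.mp hx with hx | hx
            · obtain ⟨y, hy, hxy⟩ := hb3 x hx
              exact ⟨y, by simp [hy], hxy⟩
            · simp only [List.mem_singleton] at hx
              exact ⟨a.headD 0, by simp, le_of_eq hx⟩
          · intro y hy
            rw [tail_append _ _ hbne]
            rcases List.mem_cons.mp hy with rfl | hy
            · exact ⟨a.headD 0, by simp, le_refl _⟩
            · rcases List.mem_append.mp hy with hy | hy
              · exact ⟨a.headD 0, by simp, hara y hy⟩
              · obtain ⟨x, hx, hyx⟩ := hb4 y hy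
                exact ⟨x, by simp [hx], hyx⟩
        · simp only [roundA, if_pos hlt, glue]
          rw [headD_append _ _ _ hbne]
          refine List.Perm.trans (List.Perm.append_left _ hperm) ?_
          refine List.perm_iff_count.mpr (fun x => ?_)
          simp only [List.count_append, List.count_cons]
          split_ifs <;> omega
      · -- a wins: merged block  a ++ [head b], ghost rest  ra ++ (head b :: rb)
        refine ⟨(ra ++ (b.headD 0 :: rb)) :: R', ?_, ?_⟩
        · refine List.forall₂_cons.mpr ⟨?_, by simpa [roundA, hlt] using hOK⟩
          have hba : b.headD 0 ≤ a.headD 0 := le_of_not_gt hlt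
          simp only [if_neg hlt]
          refine ⟨by simp, ?_, ?_, ?_⟩
          · intro x hx
            rw [headD_append _ _ _ hane]
            rcases List.mem_append.mp hx with hx | hx
            · exact hara x hx
            · rcases List.mem_cons.mp hx with rfl | hx
              · exact hba
              · exact (hbrb x hx).trans hba
          · intro x hx
            rw [tail_append _ _ hane] at hx
            rcases List.mem_append.mp hx with hx | hx
            · obtain ⟨y, hy, hxy⟩ := ha3 x hx
              exact ⟨y, by simp [hy], hxy⟩
            · simp only [List.mem_singleton] at hx
              exact ⟨b.headD 0, by simp, le_of_eq hx⟩
          · intro y hy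
            rw [tail_append _ _ hane]
            rcases List.mem_append.mp hy with hy | hy
            · obtain ⟨x, hx, hyx⟩ := ha4 y hy
              exact ⟨x, by simp [hx], hyx⟩
            · rcases List.mem_cons.mp hy with rfl | hy
              · exact ⟨b.headD 0, by simp, le_refl _⟩
              · exact ⟨b.headD 0, by simp, hbrb y hy⟩
        · simp only [roundA, if_neg hlt, glue]
          rw [headD_append _ _ _ hane]
          refine List.Perm.trans (List.Perm.append_left _ hperm) ?_
          refine List.perm_iff_count.mpr (fun x => ?_)
          simp only [List.count_append, List.count_cons]
          split_ifs <;> omega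

theorem hdb_zero (x : List Int) (T : List (List Int)) : hdb (x :: T) 0 = x.headD 0 := rfl
theorem hdb_succ (x : List Int) (T : List (List Int)) (j : Nat) :
    hdb (x :: T) (j + 1) = hdb T j := rfl
theorem lnb_zero (x : List Int) (T : List (List Int)) : lnb (x :: T) 0 = x.length := rfl
theorem lnb_succ (x : List Int) (T : List (List Int)) (j : Nat) :
    lnb (x :: T) (j + 1) = lnb T j := rfl

theorem rndA_ne : ∀ (T : List (List Int)) (c : Int), (∀ l ∈ T, l ≠ []) →
    ∀ l ∈ (roundA T c).1, l ≠ []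
  | [], _, _ => by simp [roundA]
  | [a], c, h => by simpa [roundA] using h
  | a :: b :: rest, c, h => by
      simp only [roundA]
      intro l hl
      rcases List.mem_cons.mp hl with rfl | hl
      · split <;> simp
      · exact rndA_ne rest (c+1) (fun l hl => h l (by simp [hl])) l hl

theorem rndA_le : ∀ (T : List (List Int)) (c : Int) (M : Int), (∀ l ∈ T, l ≠ []) →
    (∀ j < T.length, hdb T j ≤ M) →
    ∀ j < (roundA T c).1.length, hdb (roundA T c).1 j ≤ M
  | [], _, _, _, _ => by simp [roundA]
  | [a], c, M, _, hA => by
      intro j hj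
      simp only [roundA] at hj ⊢
      exact hA j (by simpa using hj)
  | a :: b :: rest, c, M, hne, hA => by
      have hane : a ≠ [] := hne a (by simp)
      have hbne : b ≠ [] := hne b (by simp)
      intro j hj
      match j with
      | 0 =>
        simp only [roundA, hdb_zero]
        split
        · rw [headD_append _ _ _ hbne]
          exact hA 1 (by simp)
        · rw [headD_append _ _ _ hane]
          exact hA 0 (by simp)
      | j + 1 =>
        simp only [roundA, hdb_succ]
        refine rndA_le rest (c+1) M (fun l hl => hne l (by simp [hl]))
          (fun j hj => hA (j+2) (by simpa using hj)) j ?_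
        simpa [roundA] using hj

theorem round_champ : ∀ (T : List (List Int)) (c : Int) (i : Nat) (M : Int),
    (∀ l ∈ T, l ≠ []) → i < T.length →
    hdb T i = M → (∀ j < i, hdb T j < M) → (∀ j < T.length, hdb T j ≤ M) →
    i / 2 < (roundA T c).1.length ∧
    hdb (roundA T c).1 (i / 2) = M ∧
    (∀ j < i / 2, hdb (roundA T c).1 j < M) ∧
    (lnb (roundA T c).1 (i / 2) : Int)
      = (lnb T i : Int) + (if T.length % 2 = 1 ∧ i = T.length - 1 then 0 else 1)
  | [], _, i, M => by intro _ hi; simp at hi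
  | [a], c, i, M => by
      intro hne hi hM hL hA
      have hi0 : i = 0 := by simpa using hi
      subst hi0
      refine ⟨by simp [roundA], by simpa [roundA] using hM, by simp, ?_⟩
      rw [if_pos (by simp)]
      simp [roundA]
  | a :: b :: rest, c, i, M => by
      intro hne hi hM hL hA
      have hane : a ≠ [] := hne a (by simp)
      have hbne : b ≠ [] := hne b (by simp)
      match i with
      | 0 =>
        have hba : b.headD 0 ≤ a.headD 0 := by
          have := hA 1 (by simp)
          rw [hdb_succ, hdb_zero] at this
          rw [hdb_zero] at hM
          omega
        have hnlt : ¬ a.headD 0 < b.headD 0 := by omega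
        refine ⟨by simp [roundA], ?_, by simp, ?_⟩
        · simp only [roundA, if_neg hnlt]
          rw [show (0:Nat)/2 = 0 from rfl, hdb_zero, headD_append _ _ _ hane]
          simpa [hdb_zero] using hM
        · rw [if_neg (by simp only [List.length_cons]; omega)]
          simp only [roundA, if_neg hnlt]
          rw [show (0:Nat)/2 = 0 from rfl, lnb_zero]
          rw [show lnb (a :: b :: rest) 0 = a.length from rfl]
          simp
      | 1 =>
        have hlt : a.headD 0 < b.headD 0 := by
          have := hL 0 (by omega)
          rw [hdb_zero] at this
          rw [hdb_succ, hdb_zero] at hM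
          omega
        refine ⟨by simp [roundA], ?_, by simp, ?_⟩
        · simp only [roundA, if_pos hlt]
          rw [show (1:Nat)/2 = 0 from rfl, hdb_zero, headD_append _ _ _ hbne]
          simpa [hdb_succ, hdb_zero] using hM
        · rw [if_neg (by simp only [List.length_cons]; omega)]
          simp only [roundA, if_pos hlt]
          rw [show (1:Nat)/2 = 0 from rfl, lnb_zero]
          rw [show lnb (a :: b :: rest) 1 = b.length from rfl]
          simp
      | k + 2 =>
        have hne' : ∀ l ∈ rest, l ≠ [] := fun l hl => hne l (by simp [hl])
        have hi' : k < rest.length := by simpa using hi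
        have hM' : hdb rest k = M := by simpa [hdb_succ] using hM
        have hL' : ∀ j < k, hdb rest j < M := fun j hj => by
          have := hL (j+2) (by omega)
          simpa [hdb_succ] using this
        have hA' : ∀ j < rest.length, hdb rest j ≤ M := fun j hj => by
          have := hA (j+2) (by simpa using hj)
          simpa [hdb_succ] using this
        obtain ⟨hlen2, hM2, hL2, hδ2⟩ := round_champ rest (c+1) k M hne' hi' hM' hL' hA'
        have hdiv : (k + 2) / 2 = k / 2 + 1 := by omega
        refine ⟨?_, ?_, ?_, ?_⟩
        · rw [hdiv]
          simp only [roundA, List.length_cons]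
          omega
        · rw [hdiv]
          simpa only [roundA, hdb_succ] using hM2
        · intro j hj
          rw [hdiv] at hj
          match j with
          | 0 =>
            simp only [roundA, hdb_zero]
            have h0 := hL 0 (by omega)
            have h1 := hL 1 (by omega)
            rw [hdb_zero] at h0
            rw [hdb_succ, hdb_zero] at h1
            split
            · rw [headD_append _ _ _ hbne]; exact h1
            · rw [headD_append _ _ _ hane]; exact h0
          | j + 1 =>
            simp only [roundA, hdb_succ]
            exact hL2 j (by omega)
        · rw [hdiv]
          simp only [roundA, lnb_succ]
          rw [hδ2]
          have hcong : (rest.length % 2 = 1 ∧ k = rest.length - 1) ↔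
              ((a :: b :: rest).length % 2 = 1 ∧ k + 2 = (a :: b :: rest).length - 1) := by
            simp only [List.length_cons]
            omega
          rw [if_congr hcong rfl rfl]

theorem blockOK_ne {T R : List (List Int)} (h : List.Forall₂ blockOK T R) :
    ∀ l ∈ T, l ≠ [] := by
  induction h with
  | nil => simp
  | cons hab _ ih =>
    intro l hl
    rcases List.mem_cons.mp hl with rfl | hl
    · exact hab.1
    · exact ih l hl

theorem loopAux_exit (f : Nat) (T : List (List Int)) (c : Int) (h : ¬ 1 < T.length) :
    loopAux f T c = (T, c) := by
  cases f with
  | zero => rfl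
  | succ f => simp [loopAux, if_neg h]

theorem loop_all : ∀ (N : Nat) (T R : List (List Int)) (c : Int) (i : Nat) (M : Int)
    (t : List Int), T.length ≤ N + 1 →
    List.Forall₂ blockOK T R → (glue T R).Perm t →
    i < T.length → hdb T i = M → (∀ j < i, hdb T j < M) → (∀ j < T.length, hdb T j ≤ M) →
    ∃ l r', loopAux N T c = ([l], c + (T.length : Int) - 1) ∧
      blockOK l r' ∧ (l.headD 0 :: r').Perm t ∧ l.headD 0 = M ∧
      (l.length : Int) = (lnb T i : Int) + bgames i T.length 0 := by
  intro N
  induction N with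
  | zero =>
    intro T R c i M t hlen hOK hperm hi hM hL hA
    match T, R, hOK, hi with
    | [l], [r'], hOK, _ =>
      refine ⟨l, r', by simp [loopAux], (List.forall₂_cons.mp hOK).1, ?_, ?_, ?_⟩
      · simpa [glue] using hperm
      · have : i = 0 := by omega
        subst this
        simpa [hdb_zero] using hM
      · have : i = 0 := by omega
        subst this
        rw [bgames_exit _ _ _ (by simp)]
        simp [lnb_zero]
  | succ N ih =>
    intro T R c i M t hlen hOK hperm hi hM hL hA
    by_cases hT : 1 < T.length
    · have hne : ∀ l ∈ T, l ≠ [] := blockOK_ne hOK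
      obtain ⟨R', hOK', hperm'⟩ := round_blocks T R c hOK
      have hperm'' : (glue (roundA T c).1 R').Perm t := hperm'.trans hperm
      obtain ⟨hi', hM', hL', hδ⟩ := round_champ T c i M hne hi hM hL hA
      have hA' := rndA_le T c M hne hA
      have hlen' : (roundA T c).1.length ≤ N + 1 := by
        rw [roundA_len]
        omega
      obtain ⟨l, r', heq, hbOK, hp, hhd, hln⟩ :=
        ih (roundA T c).1 R' (roundA T c).2 (i / 2) M t hlen' hOK' hperm'' hi' hM' hL' hA'
      refine ⟨l, r', ?_, hbOK, hp, hhd, ?_⟩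
      · show loopAux (N + 1) T c = _
        simp only [loopAux, if_pos hT]
        rw [heq, roundA_nbc, roundA_len]
        have h2 : ((((T.length + 1) / 2 : Nat)) : Int) + ((T.length / 2 : Nat) : Int)
            = (T.length : Int) := by omega
        congr 1
        omega
      · rw [hln, hδ, roundA_len, bgames_step i T.length 0 hT]
        have hacc := bgames_acc ((T.length + 1) / 2) (i / 2) 1
        split_ifs with hc
        · ring
        · rw [show ((0:Int) + 1) = 1 from rfl, hacc]
          ring
    · have h1 : T.length = 1 := by omega
      match T, R, hOK, hi with
      | [l], [r'], hOK, _ =>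
        refine ⟨l, r', by simp [loopAux_exit _ _ _ hT], (List.forall₂_cons.mp hOK).1, ?_, ?_, ?_⟩
        · simpa [glue] using hperm
        · have : i = 0 := by omega
          subst this
          simpa [hdb_zero] using hM
        · have : i = 0 := by omega
          subst this
          rw [bgames_exit _ _ _ (by simp)]
          simp [lnb_zero]

theorem init_OK : ∀ (t : List Int),
    List.Forall₂ blockOK (t.map fun x => [x]) (t.map fun _ => ([] : List Int)) := by
  intro t
  induction t with
  | nil => simp
  | cons x t ih =>
    refine List.forall₂_cons.mpr ⟨?_, ih⟩
    exact ⟨by simp, by simp, by simp, by simp⟩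

theorem init_glue : ∀ (t : List Int),
    glue (t.map fun x => [x]) (t.map fun _ => ([] : List Int)) = t := by
  intro t
  induction t with
  | nil => rfl
  | cons x t ih =>
    simp only [List.map_cons, glue, List.headD_cons, List.cons_append, List.nil_append]
    rw [ih]

theorem init_hdb (t : List Int) (j : Nat) (hj : j < t.length) :
    hdb (t.map fun x => [x]) j = t[j] := by
  simp [hdb, List.getElem?_map, List.getElem?_eq_getElem hj]

theorem init_lnb (t : List Int) (j : Nat) (hj : j < t.length) :
    lnb (t.map fun x => [x]) j = 1 := by
  simp [lnb, List.getElem?_map, List.getElem?_eq_getElem hj]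

-- ===== VERDICT (by name: the statement is the Claim_ definition above) =====
theorem hop_spec : Claim_equal_hop := by
  intro t _ hpre
  unfold Pre_hop at hpre
  unfold Spec_hop
  have hne1 : (t.length == 1) = false := by simp; omega
  -- the sorted list and its head facts
  have hslen : 2 ≤ (PySem.List.sorted t (fun x => x) true).length := by
    rw [(PySem.List.sorted_perm t (fun x => x) true).length_eq]
    exact hpre
  obtain ⟨m, s1, srest, hs⟩ : ∃ m s1 srest,
      PySem.List.sorted t (fun x => x) true = m :: s1 :: srest := by
    match h : PySem.List.sorted t (fun x => x) true, hslen with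
    | m :: s1 :: srest, _ => exact ⟨m, s1, srest, rfl⟩
  have hps : (m :: s1 :: srest).Perm t := hs ▸ PySem.List.sorted_perm t (fun x => x) true
  have hm_ge : ∀ y ∈ t, y ≤ m := fun y hy =>
    PySem.List.key_head_sorted_rev_ge t (fun x => x) hs y hy
  have hm_mem : m ∈ t := hps.subset (by simp)
  have hpw : (m :: s1 :: srest).Pairwise (fun a b : Int => b ≤ a) :=
    hs ▸ PySem.List.sorted_pairwise_rev t (fun x => x)
  have hs1 : ∀ y ∈ s1 :: srest, y ≤ s1 := by
    intro y hy
    rcases List.mem_cons.mp hy with rfl | hy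
    · exact le_refl _
    · exact ((List.pairwise_cons.mp (List.pairwise_cons.mp hpw).2).1 y hy)
  -- the winner's index
  obtain ⟨k, hk⟩ : ∃ k, PySem.List.index? t m = some k :=
    Option.isSome_iff_exists.mp ((PySem.List.index?_isSome_iff t m).mpr hm_mem)
  obtain ⟨hkl, hkm, hkfirst⟩ := PySem.List.getElem_of_index?_eq_some hk
  -- run the tournament
  obtain ⟨l, r', heq, hbOK, hp, hhd, hln⟩ :=
    loop_all (t.map fun x => [x]).length (t.map fun x => [x]) (t.map fun _ => []) 0 k m t
      (by simp) (init_OK t) (by rw [init_glue t]) (by simpa using hkl)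
      (by rw [init_hdb t k hkl]; exact hkm)
      (fun j hj => by
        rw [init_hdb t j (by omega)]
        exact lt_of_le_of_ne (hm_ge _ (List.getElem_mem _)) (hkfirst j hj))
      (fun j hj => by
        rw [init_hdb t j (by simpa using hj)]
        exact hm_ge _ (List.getElem_mem _))
  rw [init_lnb t k hkl] at hln
  -- the second-place value: max over the winner's captured heads is s1
  have hg1 : 1 ≤ bgames k (t.map fun x => [x]).length 0 := by
    refine bgames_pos _ k ?_
    simpa using hpre
  have hlt_ne : l.tail ≠ [] := by
    have h2 : 2 ≤ l.length := by omega
    intro hnil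
    have := congrArg List.length hnil
    simp at this
    omega
  obtain ⟨m', hm'⟩ : ∃ m', PySem.List.max? l.tail (fun x => x) = some m' := by
    rcases h : PySem.List.max? l.tail (fun x => x) with _ | m'
    · exact absurd ((PySem.List.max?_eq_none_iff l.tail _).mp h) hlt_ne
    · exact ⟨m', rfl⟩
  have hmax1 : ∀ y ∈ l.tail, y ≤ m' := PySem.List.max?_isMax hm'
  have hm'mem : m' ∈ l.tail := PySem.List.max?_mem hm'
  obtain ⟨_, hr2, hr3, hr4⟩ := hbOK
  have hperm2 : r'.Perm (s1 :: srest) := by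
    have h1 : (m :: r').Perm (m :: s1 :: srest) := (hhd ▸ hp).trans hps.symm
    exact h1.cons_inv
  have hm'_eq : m' = s1 := by
    have hle : m' ≤ s1 := by
      obtain ⟨y, hy, hmy⟩ := hr3 m' hm'mem
      exact hmy.trans (hs1 y (hperm2.subset hy))
    have hge : s1 ≤ m' := by
      obtain ⟨x, hx, hsx⟩ := hr4 s1 (hperm2.mem_iff.mpr (by simp))
      exact hsx.trans (hmax1 x hx)
    omega
  -- assemble the triples
  simp only [hop, hop_alt, hne1, Bool.false_eq_true, if_false,
    PySem.List.foldl_append_singleton_eq_map, List.nil_append, hs]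
  rw [heq]
  simp only [List.headD_cons, List.drop_one, List.tail_cons, hm', Option.getD_some,
    Option.getD_some, Prod.mk.injEq]
  refine ⟨hhd, hm'_eq, ?_⟩
  rw [hk]
  simp only [List.length_map] at hln hg1 ⊢
  simp only [Option.getD_some]
  omega
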